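-- pv_equiv track=rewrite | github.com/SFE-core/SFE | sfe/connectors/strain.py | _estimate_pair_groups
-- ===== SOURCE A (Python) =====
-- def _parse_label(col: str, sep: str | None) -> tuple[str, str]:
--     """Split a label into (device, gauge) using the detected separator."""
--     if sep and sep in col:
--         parts = col.split(sep, 1)
--         return parts[0].strip(), parts[1].strip()
--     return col, col
--
-- def _estimate_pair_groups(labels: list[str], sep: str | None) -> tuple[int, int]:
--     """Estimate within/cross pair counts before running the instrument."""
--     N = len(labels)
--     n_total = N * (N - 1) // 2
--     if sep is None:
--         return 0, n_total
--
--     within = 0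
--     for i in range(N):
--         for j in range(i + 1, N):
--             dev_i, _ = _parse_label(labels[i], sep)
--             dev_j, _ = _parse_label(labels[j], sep)
--             if dev_i == dev_j:
--                 within += 1
--     return within, n_total - within
-- ===== SOURCE B (Python) =====
-- def _parse_label(col, sep):
--     """Split a label into (device, gauge) using the detected separator."""
--     if sep and sep in col:
--         parts = col.split(sep, 1)
--         return parts[0].strip(), parts[1].strip()
--     return col, col
--
-- def _estimate_pair_groups(labels, sep):
--     """Estimate within/cross pair counts: group by device, sum c*(c-1)//2 per group."""
--     N = len(labels)
--     n_total = N * (N - 1) // 2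
--     if sep is None:
--         return 0, n_total
--     counts = {}
--     for col in labels:
--         dev, _ = _parse_label(col, sep)
--         counts[dev] = counts.get(dev, 0) + 1
--     within = sum(c * (c - 1) // 2 for c in counts.values())
--     return within, n_total - within
-- ===== Notes on version B (the rewrite author's own statement) =====
-- stated objective: faster
-- what changed: B replaces A's O(N^2) all-pairs double loop by a single pass that parses each label once, groups device counts in a dict, and sums c*(c-1)//2 per group.
import Mathlib
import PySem

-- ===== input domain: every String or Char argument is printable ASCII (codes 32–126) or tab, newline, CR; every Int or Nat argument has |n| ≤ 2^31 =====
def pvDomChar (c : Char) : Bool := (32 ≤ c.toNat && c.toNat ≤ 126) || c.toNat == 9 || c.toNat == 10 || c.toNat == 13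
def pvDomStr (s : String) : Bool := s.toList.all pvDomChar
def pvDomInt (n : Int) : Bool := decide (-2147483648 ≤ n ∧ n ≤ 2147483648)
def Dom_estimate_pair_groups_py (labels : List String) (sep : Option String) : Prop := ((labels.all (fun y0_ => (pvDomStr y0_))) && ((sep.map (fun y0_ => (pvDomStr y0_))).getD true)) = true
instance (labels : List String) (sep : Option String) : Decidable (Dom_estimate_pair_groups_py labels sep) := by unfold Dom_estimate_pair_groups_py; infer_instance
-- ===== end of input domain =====

-- B groups labels by device once in a dict and sums c*(c-1)//2 per group (O(N))
-- instead of A's O(N^2) scan over all pairs; same return value everywhere.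

-- ===== PORT A =====
-- helper _parse_label (shared verbatim by both Pythons).  '.getD []' is exact: splitMax? is
-- none only for sep = "", excluded by the guard; pyGetD defaults are exact: a split on a
-- contained separator always yields ≥ 2 parts, so indices 0 and 1 are in range.
def parse_label (col : String) (sep : String) : String × String :=
  if sep ≠ "" ∧ PySem.Str.isIn sep col = true then
    let parts := (PySem.Str.splitMax? col sep 1).getD []
    (PySem.Str.strip (PySem.List.pyGetD parts 0 ""),
     PySem.Str.strip (PySem.List.pyGetD parts 1 ""))
  else (col, col)

def estimate_pair_groups_py (labels : List String) (sep : Option String) : Int × Int :=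
  let N : Int := labels.length
  let n_total := PySem.Int.floordiv (N * (N - 1)) 2
  match sep with
  | none => (0, n_total)
  | some s =>
    let within :=
      (PySem.List.pyRange 0 N 1).foldl (fun w i =>
        (PySem.List.pyRange (i + 1) N 1).foldl (fun w j =>
          let dev_i := (parse_label (PySem.List.pyGetD labels i "") s).1
          let dev_j := (parse_label (PySem.List.pyGetD labels j "") s).1
          if dev_i == dev_j then w + 1 else w) w) 0
    (within, n_total - within)

-- ===== PORT B =====
def estimate_pair_groups_py_alt (labels : List String) (sep : Option String) : Int × Int :=
  let N : Int := labels.length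
  let n_total := PySem.Int.floordiv (N * (N - 1)) 2
  match sep with
  | none => (0, n_total)
  | some s =>
    let counts : PySem.Dict String Int :=
      labels.foldl (fun d col =>
        let dev := (parse_label col s).1
        d.insert dev (d.getD dev 0 + 1)) PySem.Dict.empty
    let within := (counts.values.map (fun c => PySem.Int.floordiv (c * (c - 1)) 2)).sum
    (within, n_total - within)

-- ===== PRECONDITION & SPEC =====
def Spec_estimate_pair_groups_py (labels : List String) (sep : Option String) (out : Int × Int) : Prop := out = estimate_pair_groups_py_alt labels sep
instance (labels : List String) (sep : Option String) (out : Int × Int) : Decidable (Spec_estimate_pair_groups_py labels sep out) := by unfold Spec_estimate_pair_groups_py; infer_instance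

-- ===== CLAIM (what is proved, stated in full; the proofs are below) =====
def Claim_equal_estimate_pair_groups_py : Prop := ∀ (labels : List String) (sep : Option String), Dom_estimate_pair_groups_py labels sep → Spec_estimate_pair_groups_py labels sep (estimate_pair_groups_py labels sep)

-- ===== LEMMAS AND PROOFS =====

-- number of (i < j) pairs of equal elements, recursively from the front
def pairCount : List String → Nat
  | [] => 0
  | d :: t => t.count d + pairCount t

-- A's index sum equals pairCount
lemma range_sum_pairCount (ds : List String) :
    ((List.range ds.length).map (fun k => ((ds.drop (k + 1)).count (ds.getD k "")))).sum
      = pairCount ds := by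
  induction ds with
  | nil => simp [pairCount]
  | cons d t ih =>
    have hmap : (List.range t.length).map
        ((fun k => ((d :: t).drop (k + 1)).count ((d :: t).getD k "")) ∘ Nat.succ)
        = (List.range t.length).map (fun k => ((t.drop (k + 1)).count (t.getD k ""))) := by
      apply List.map_congr_left
      intro k hk
      simp
    rw [List.length_cons, List.range_succ_eq_map, List.map_cons, List.map_map,
      List.sum_cons, hmap, ih]
    simp [pairCount, List.getD]

lemma two_dvd_mul_pred (c : Nat) : 2 ∣ c * (c - 1) := by
  rcases Nat.even_or_odd c with h | h
  · exact Dvd.dvd.mul_right h.two_dvd _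
  · rcases c with _ | m
    · simp
    · have hm : Even m := Nat.Odd.sub_odd h odd_one
      exact Dvd.dvd.mul_left (by simpa using hm.two_dvd) _

lemma choose2_succ (c : Nat) : (c + 1) * c / 2 = c * (c - 1) / 2 + c := by
  have h1 := two_dvd_mul_pred c
  have e : (c + 1) * c = c * (c - 1) + 2 * c := by
    rcases c with _ | m
    · simp
    · simp only [Nat.add_sub_cancel]; ring
  omega

-- sum over a Nodup list of two functions agreeing off d
lemma sum_map_congr_except (S : List String) (d : String) (hnd : S.Nodup) (hd : d ∈ S)
    (f g : String → Nat) (h : ∀ k ∈ S, k ≠ d → f k = g k) :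
    (S.map f).sum + g d = (S.map g).sum + f d := by
  induction S with
  | nil => cases hd
  | cons x t ih =>
    simp only [List.map_cons, List.sum_cons]
    rcases List.nodup_cons.mp hnd with ⟨hx, hndt⟩
    by_cases hxd : x = d
    · subst hxd
      have : t.map f = t.map g := by
        apply List.map_congr_left
        intro k hk
        exact h k (List.mem_cons_of_mem _ hk) (fun he => hx (he ▸ hk))
      rw [this]; omega
    · have hdt : d ∈ t := by
        rcases List.mem_cons.mp hd with h' | h'
        · exact absurd h'.symm hxd
        · exact h'
      have := ih hndt hdt (fun k hk => h k (List.mem_cons_of_mem _ hk))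
      have hfx : f x = g x := h x List.mem_cons_self hxd
      omega

-- B's per-group sum equals pairCount
lemma group_sum_pairCount (ds S : List String) (hnd : S.Nodup) (hsub : ∀ x ∈ ds, x ∈ S) :
    (S.map (fun k => ds.count k * (ds.count k - 1) / 2)).sum = pairCount ds := by
  induction ds with
  | nil => simp [pairCount]
  | cons d t ih =>
    have hd : d ∈ S := hsub d List.mem_cons_self
    have hkey := sum_map_congr_except S d hnd hd
      (fun k => (d :: t).count k * ((d :: t).count k - 1) / 2)
      (fun k => t.count k * (t.count k - 1) / 2)
      (by
        intro k hk hne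
        have hc : (d :: t).count k = t.count k := by
          rw [List.count_cons]; simp [Ne.symm hne]
        simp only [hc])
    beta_reduce at hkey
    have hcd : (d :: t).count d = t.count d + 1 := by simp
    rw [hcd] at hkey
    simp only [Nat.add_sub_cancel] at hkey
    rw [choose2_succ] at hkey
    have ihS := ih (fun x hx => hsub x (List.mem_cons_of_mem _ hx))
    simp only [pairCount]
    omega

lemma floordiv_choose2 (c : Nat) :
    PySem.Int.floordiv ((c : Int) * ((c : Int) - 1)) 2 = ((c * (c - 1) / 2 : Nat) : Int) := by
  rcases c with _ | m
  · simp [PySem.Int.floordiv]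
  · have : ((m + 1 : Nat) : Int) * (((m + 1 : Nat) : Int) - 1) = ((((m + 1) * m : Nat)) : Int) := by
      push_cast; ring
    rw [this]
    simp only [Nat.add_sub_cancel]
    exact_mod_cast PySem.Int.floordiv_natCast ((m + 1) * m) 2

-- in range, getD through a map is the mapped element
lemma getD_map_key (labels : List String) (key : String → String) (k : Nat)
    (hk : k < labels.length) :
    key (labels.getD k "") = (labels.map key).getD k "" := by
  rw [List.getD_eq_getElem _ _ hk, List.getD_eq_getElem _ _ (by simpa using hk),
    List.getElem_map]

-- A's double loop equals B's per-group sum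
lemma within_eq (labels : List String) (s : String) :
    (PySem.List.pyRange 0 (labels.length : Int) 1).foldl (fun w i =>
      (PySem.List.pyRange (i + 1) (labels.length : Int) 1).foldl (fun w j =>
        if (parse_label (PySem.List.pyGetD labels i "") s).1
            == (parse_label (PySem.List.pyGetD labels j "") s).1 then w + 1 else w) w) 0
    = (((labels.foldl (fun d col =>
          d.insert (parse_label col s).1 (d.getD (parse_label col s).1 0 + 1))
          PySem.Dict.empty).values).map (fun c => PySem.Int.floordiv (c * (c - 1)) 2)).sum := by
  have hA :
      (PySem.List.pyRange 0 (labels.length : Int) 1).foldl (fun w i =>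
        (PySem.List.pyRange (i + 1) (labels.length : Int) 1).foldl (fun w j =>
          if (parse_label (PySem.List.pyGetD labels i "") s).1
              == (parse_label (PySem.List.pyGetD labels j "") s).1 then w + 1 else w) w) 0
      = ((pairCount (labels.map (fun col => (parse_label col s).1)) : Nat) : Int) := by
    rw [PySem.List.pyRange_zero_natCast, List.foldl_map]
    have hstep : (List.range labels.length).foldl (fun (w : Int) (k : Nat) =>
        (PySem.List.pyRange ((k : Int) + 1) (labels.length : Int) 1).foldl (fun w j =>
          if (parse_label (PySem.List.pyGetD labels (k : Int) "") s).1
              == (parse_label (PySem.List.pyGetD labels j "") s).1 then w + 1 else w) w) 0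
        = (List.range labels.length).foldl (fun (w : Int) (k : Nat) =>
          w + (((labels.map (fun col => (parse_label col s).1)).drop (k + 1)).count
            ((labels.map (fun col => (parse_label col s).1)).getD k "") : Int)) 0 := by
      apply PySem.List.foldl_congr_mem
      intro w k hkmem
      have hk : k < labels.length := List.mem_range.mp hkmem
      have e1 : ((k : Int) + 1) = ((k + 1 : Nat) : Int) := by push_cast; ring
      rw [e1, PySem.List.foldl_pyRange_pyGetD' labels ""
        (fun w x => if (parse_label (PySem.List.pyGetD labels (k : Int) "") s).1
            == (parse_label x s).1 then w + 1 else w) w (by positivity)]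
      rw [Int.toNat_natCast]
      have hfold : (labels.drop (k + 1)).foldl
          (fun (w : Int) x => if (parse_label (PySem.List.pyGetD labels (k : Int) "") s).1
            == (parse_label x s).1 then w + 1 else w) w
          = ((labels.drop (k + 1)).map (fun col => (parse_label col s).1)).foldl
          (fun (w : Int) y => if (parse_label (PySem.List.pyGetD labels (k : Int) "") s).1
            == y then w + 1 else w) w := by
        rw [List.foldl_map]
      rw [hfold]
      have hflip : ∀ (w : Int) (y : String),
          (if (parse_label (PySem.List.pyGetD labels (k : Int) "") s).1 == y
            then w + 1 else w)
          = (if y == (parse_label (PySem.List.pyGetD labels (k : Int) "") s).1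
            then w + 1 else w) := by
        intro w y; rw [Bool.beq_comm]
      simp only [hflip]
      rw [PySem.List.foldl_beq_add_one]
      rw [PySem.List.pyGetD_natCast]
      rw [getD_map_key labels (fun col => (parse_label col s).1) k hk]
      rw [List.map_drop]
    rw [hstep]
    rw [PySem.List.foldl_add]
    rw [zero_add]
    have hlen : labels.length = (labels.map (fun col => (parse_label col s).1)).length := by
      simp
    rw [hlen, ← range_sum_pairCount (labels.map (fun col => (parse_label col s).1))]
    rw [Nat.cast_list_sum, List.map_map]
    rfl
  have hB :
      (((labels.foldl (fun d col =>
          d.insert (parse_label col s).1 (d.getD (parse_label col s).1 0 + 1))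
          PySem.Dict.empty).values).map (fun c => PySem.Int.floordiv (c * (c - 1)) 2)).sum
      = ((pairCount (labels.map (fun col => (parse_label col s).1)) : Nat) : Int) := by
    have hfold : labels.foldl (fun (d : PySem.Dict String Int) col =>
        d.insert (parse_label col s).1 (d.getD (parse_label col s).1 0 + 1))
        PySem.Dict.empty
        = (labels.map (fun col => (parse_label col s).1)).foldl
          (fun (d : PySem.Dict String Int) x => d.insert x (d.getD x 0 + 1))
          PySem.Dict.empty := by
      rw [List.foldl_map]
    rw [hfold, PySem.Dict.foldl_insert_getD_add_one_eq_counter]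
    simp only [PySem.Dict.values, PySem.Dict.items_counter, List.map_map]
    rw [List.map_congr_left
      (g := fun k => ((((labels.map (fun col => (parse_label col s).1)).count k) *
        (((labels.map (fun col => (parse_label col s).1)).count k) - 1) / 2 : Nat) : Int))
      (by
        intro k _
        simp only [Function.comp_apply]
        exact floordiv_choose2 _)]
    rw [← group_sum_pairCount (labels.map (fun col => (parse_label col s).1))
      (PySem.Set.ofList (labels.map (fun col => (parse_label col s).1)))
      (PySem.Set.nodup_ofList _)
      (fun x hx => (PySem.Set.mem_ofList _ _).mpr hx)]
    rw [Nat.cast_list_sum, List.map_map]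
    rfl
  rw [hA, hB]

-- ===== VERDICT (by name: the statement is the Claim_ definition above) =====
theorem estimate_pair_groups_py_spec : Claim_equal_estimate_pair_groups_py := by
  intro labels sep _
  unfold Spec_estimate_pair_groups_py estimate_pair_groups_py estimate_pair_groups_py_alt
  cases sep with
  | none => rfl
  | some s =>
    simp only
    rw [within_eq labels s]
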